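-- pv_equiv track=rewrite | github.com/Himan99/QueensSolver | CoreSolver.py | get_xs_for_one_color
-- ===== SOURCE A (Python) =====
-- def check_and_append(ans, x, y, board):
--     if x>=0 and x<len(board) and y>=0 and y<len(board[0]):
--         ans.append([x,y])
--     return ans
--
-- def get_xs_for_one_cell(x, y, board):
--     height = len(board)
--     width = len(board[0])
--     ans = []
--     for i in range(width):
--         if i != y:
--             ans.append([x,i])
--     for i in range(height):
--         if i != x:
--             ans.append([i,y])
--
--     ans = check_and_append(ans, x-1, y-1, board)
--     ans = check_and_append(ans, x-1, y, board)
--     ans = check_and_append(ans, x-1, y+1, board)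
--     ans = check_and_append(ans, x, y-1, board)
--     ans = check_and_append(ans, x, y+1, board)
--     ans = check_and_append(ans, x+1, y-1, board)
--     ans = check_and_append(ans, x+1, y, board)
--     ans = check_and_append(ans, x+1, y+1, board)
--     return ans
--
-- def get_xs_for_one_color(color, colorMap, board):
--     s = set()
--     coords = colorMap[color]
--     # get x for first point of a color
--     if len(coords) == 0:
--         return s
--     xs = get_xs_for_one_cell(coords[0][0], coords[0][1], board)
--     xs = set(map(tuple, xs))
--     s = s | xs
--
--     for i in range(1, len(coords)):
--         xs = get_xs_for_one_cell(coords[i][0], coords[i][1], board)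
--         xs = set(map(tuple, xs))
--         s = s & xs
--
--     # draw(list(s), board)
--
--     # for i in s:
--     #     x,y = i
--     #     color = board[x][y]
--     #     if [x, y] in colorMap[color]:
--     #         colorMap[color].remove([x,y])
--
--     # eliminateCells(s, colorMap, board)
--
--     return s
-- ===== SOURCE B (Python) =====
-- def attacks(c, a, b, h, w):
--     cx, cy = c[0], c[1]
--     return (a == cx and b != cy and 0 <= b < w) \
--         or (b == cy and a != cx and 0 <= a < h) \
--         or (max(abs(a - cx), abs(b - cy)) == 1 and 0 <= a < h and 0 <= b < w)
--
-- def first_cell_attacks(cx, cy, h, w):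
--     return [(cx, j) for j in range(w) if j != cy] \
--         + [(i, cy) for i in range(h) if i != cx] \
--         + [(cx + d[0], cy + d[1])
--            for d in [(-1, -1), (-1, 0), (-1, 1), (0, -1), (0, 1), (1, -1), (1, 0), (1, 1)]
--            if 0 <= cx + d[0] < h and 0 <= cy + d[1] < w]
--
-- def get_xs_for_one_color(color, colorMap, board):
--     coords = colorMap[color]
--     if len(coords) == 0:
--         return set()
--     h, w = len(board), len(board[0])
--     cands = first_cell_attacks(coords[0][0], coords[0][1], h, w)
--     return {p for p in cands if all(attacks(c, p[0], p[1], h, w) for c in coords)}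
-- ===== Notes on version B (the rewrite author's own statement) =====
-- stated objective: alternative
-- what changed: Instead of building a per-cell attack set for every colored cell and intersecting them, B enumerates only the first cell's attack squares once and keeps those passing a constant-space arithmetic 'attacked by this cell' test against every colored cell.
import Mathlib
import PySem

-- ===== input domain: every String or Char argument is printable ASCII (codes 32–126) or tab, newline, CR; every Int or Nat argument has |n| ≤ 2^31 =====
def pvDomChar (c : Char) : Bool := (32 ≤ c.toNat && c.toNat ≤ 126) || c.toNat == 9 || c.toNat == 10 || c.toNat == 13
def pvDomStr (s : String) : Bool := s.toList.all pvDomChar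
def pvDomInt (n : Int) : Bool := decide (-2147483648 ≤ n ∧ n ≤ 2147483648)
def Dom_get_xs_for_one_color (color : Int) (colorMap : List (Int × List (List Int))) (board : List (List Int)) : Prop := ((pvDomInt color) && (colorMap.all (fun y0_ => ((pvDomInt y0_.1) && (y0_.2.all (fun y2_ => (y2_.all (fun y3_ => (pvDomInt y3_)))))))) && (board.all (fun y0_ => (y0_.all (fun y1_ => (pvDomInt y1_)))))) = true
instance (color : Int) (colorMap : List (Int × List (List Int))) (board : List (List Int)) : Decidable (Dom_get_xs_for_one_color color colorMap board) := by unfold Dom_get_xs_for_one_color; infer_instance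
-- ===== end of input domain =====

-- B drops A's per-cell attack-set construction and chain of set intersections: it enumerates the
-- first cell's attack squares once and keeps those passing an arithmetic "attacked by every cell" test.

-- ===== PORT A =====

def pvToPair (l : List Int) : Int × Int := (PySem.List.pyGetD l 0 0, PySem.List.pyGetD l 1 0)

def check_and_append (ans : List (List Int)) (x y : Int) (board : List (List Int)) : List (List Int) :=
  if 0 ≤ x ∧ x < (board.length : Int) ∧ 0 ≤ y ∧ y < (((PySem.List.pyGet? board 0).getD []).length : Int)
  then ans ++ [[x, y]] else ans

def get_xs_for_one_cell (x y : Int) (board : List (List Int)) : List (List Int) :=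
  let height : Int := board.length
  let width : Int := ((PySem.List.pyGet? board 0).getD []).length
  let ans : List (List Int) :=
    (PySem.List.pyRange 0 width 1).foldl (fun ans i => if i ≠ y then ans ++ [[x, i]] else ans) []
  let ans :=
    (PySem.List.pyRange 0 height 1).foldl (fun ans i => if i ≠ x then ans ++ [[i, y]] else ans) ans
  let ans := check_and_append ans (x-1) (y-1) board
  let ans := check_and_append ans (x-1) y board
  let ans := check_and_append ans (x-1) (y+1) board
  let ans := check_and_append ans x (y-1) board
  let ans := check_and_append ans x (y+1) board
  let ans := check_and_append ans (x+1) (y-1) board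
  let ans := check_and_append ans (x+1) y board
  let ans := check_and_append ans (x+1) (y+1) board
  ans

def get_xs_for_one_color (color : Int) (colorMap : List (Int × List (List Int))) (board : List (List Int)) : List (Int × Int) :=
  let s : PySem.Set (Int × Int) := PySem.Set.empty
  match (⟨colorMap⟩ : PySem.Dict Int (List (List Int))).get? color with
  | none => s
  | some coords =>
    if coords.length = 0 then s else
    let c0 := PySem.List.pyGetD coords 0 []
    let xs := get_xs_for_one_cell (PySem.List.pyGetD c0 0 0) (PySem.List.pyGetD c0 1 0) board
    let xs : PySem.Set (Int × Int) := PySem.Set.ofList (xs.map pvToPair)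
    let s := PySem.Set.union s xs
    let s := (PySem.List.pyRange 1 (coords.length : Int) 1).foldl (fun s i =>
        let c := PySem.List.pyGetD coords i []
        let xs := get_xs_for_one_cell (PySem.List.pyGetD c 0 0) (PySem.List.pyGetD c 1 0) board
        PySem.Set.inter s (PySem.Set.ofList (xs.map pvToPair))) s
    s

-- ===== PORT B =====
def pvAttacks (c : List Int) (a b h w : Int) : Bool :=
  let cx := PySem.List.pyGetD c 0 0
  let cy := PySem.List.pyGetD c 1 0
  (a == cx && b != cy && decide (0 ≤ b) && decide (b < w))
  || (b == cy && a != cx && decide (0 ≤ a) && decide (a < h))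
  || (max (a - cx).natAbs (b - cy).natAbs == 1
      && decide (0 ≤ a) && decide (a < h) && decide (0 ≤ b) && decide (b < w))

def pvCands (x y h w : Int) : List (Int × Int) :=
  ((PySem.List.pyRange 0 w 1).filter (fun j => j ≠ y)).map (fun j => (x, j))
  ++ ((PySem.List.pyRange 0 h 1).filter (fun i => i ≠ x)).map (fun i => (i, y))
  ++ (([(-1,-1),(-1,0),(-1,1),(0,-1),(0,1),(1,-1),(1,0),(1,1)] : List (Int × Int)).filter
        (fun d => decide (0 ≤ x + d.1 ∧ x + d.1 < h ∧ 0 ≤ y + d.2 ∧ y + d.2 < w))).map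
      (fun d => (x + d.1, y + d.2))

def get_xs_for_one_color_alt (color : Int) (colorMap : List (Int × List (List Int))) (board : List (List Int)) : List (Int × Int) :=
  match (⟨colorMap⟩ : PySem.Dict Int (List (List Int))).get? color with
  | none => []
  | some coords =>
    if coords.length = 0 then [] else
    let h : Int := board.length
    let w : Int := ((PySem.List.pyGet? board 0).getD []).length
    let c0 := PySem.List.pyGetD coords 0 []
    let cands := pvCands (PySem.List.pyGetD c0 0 0) (PySem.List.pyGetD c0 1 0) h w
    PySem.Set.ofList (cands.filter (fun p => coords.all (fun c => pvAttacks c p.1 p.2 h w)))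

-- ===== PRECONDITION & SPEC =====
-- Pre_ is exactly where the Python A returns: the color key exists (else KeyError), and when its
-- coordinate list is nonempty the board is nonempty (else board[0] raises IndexError) and every
-- coordinate has at least two entries (else coords[i][0] / coords[i][1] raises IndexError).
def Pre_get_xs_for_one_color (color : Int) (colorMap : List (Int × List (List Int))) (board : List (List Int)) : Prop :=
  (match (⟨colorMap⟩ : PySem.Dict Int (List (List Int))).get? color with
   | none => false
   | some coords => coords.isEmpty || (!board.isEmpty && coords.all (fun c => decide (2 ≤ c.length)))) = true
instance (color : Int) (colorMap : List (Int × List (List Int))) (board : List (List Int)) : Decidable (Pre_get_xs_for_one_color color colorMap board) := by unfold Pre_get_xs_for_one_color; infer_instance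

def pvWitness_get_xs_for_one_color : Int × (List (Int × List (List Int))) × List (List Int) :=
  (0, [(0, [[0, 0]])], [[5]])

def Spec_get_xs_for_one_color (color : Int) (colorMap : List (Int × List (List Int))) (board : List (List Int)) (out : List (Int × Int)) : Prop := out = get_xs_for_one_color_alt color colorMap board
instance (color : Int) (colorMap : List (Int × List (List Int))) (board : List (List Int)) (out : List (Int × Int)) : Decidable (Spec_get_xs_for_one_color color colorMap board out) := by unfold Spec_get_xs_for_one_color; infer_instance

-- ===== CLAIM (what is proved, stated in full; the proofs are below) =====
def Claim_equal_get_xs_for_one_color : Prop := ∀ (color : Int) (colorMap : List (Int × List (List Int))) (board : List (List Int)), Dom_get_xs_for_one_color color colorMap board → Pre_get_xs_for_one_color color colorMap board → Spec_get_xs_for_one_color color colorMap board (get_xs_for_one_color color colorMap board)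

-- ===== LEMMAS AND PROOFS =====

lemma check_eq (ans : List (List Int)) (x y : Int) (board : List (List Int)) :
    check_and_append ans x y board
      = ans ++ (if 0 ≤ x ∧ x < (board.length : Int) ∧ 0 ≤ y ∧ y < (((PySem.List.pyGet? board 0).getD []).length : Int)
                then [[x, y]] else []) := by
  unfold check_and_append; split <;> simp

lemma map_filter_cons {α β : Type} (f : α → β) (p : α → Bool) (a : α) (l : List α) :
    (List.filter p (a :: l)).map f = (if p a = true then [f a] else []) ++ (List.filter p l).map f := by
  rw [List.filter_cons]; split <;> simp

lemma cands_eq (x y : Int) (board : List (List Int)) :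
    (get_xs_for_one_cell x y board).map pvToPair
      = pvCands x y (board.length : Int) (((PySem.List.pyGet? board 0).getD []).length : Int) := by
  unfold get_xs_for_one_cell pvCands
  simp only [check_eq]
  rw [show (fun (ans : List (List Int)) (i : Int) => if i ≠ y then ans ++ [[x, i]] else ans)
        = (fun ans i => if (decide (i ≠ y)) = true then ans ++ [(fun j => [x, j]) i] else ans) by simp,
      PySem.List.foldl_append_if]
  rw [show (fun (ans : List (List Int)) (i : Int) => if i ≠ x then ans ++ [[i, y]] else ans)
        = (fun ans i => if (decide (i ≠ x)) = true then ans ++ [(fun j => [j, y]) i] else ans) by simp,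
      PySem.List.foldl_append_if]
  simp only [List.map_append, List.append_assoc, List.nil_append, List.map_map]
  rw [show (pvToPair ∘ fun j => [x, j]) = (fun j => ((x, j) : Int × Int)) from
        funext (fun j => by simp [pvToPair, PySem.List.pyGetD]),
      show (pvToPair ∘ fun j => [j, y]) = (fun j => ((j, y) : Int × Int)) from
        funext (fun j => by simp [pvToPair, PySem.List.pyGetD]),
      List.append_right_inj, List.append_right_inj]
  have eA : ∀ (u v : Int), List.map pvToPair
        (if 0 ≤ u ∧ u < (board.length : Int) ∧ 0 ≤ v ∧ v < (((PySem.List.pyGet? board 0).getD []).length : Int)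
         then [[u, v]] else [])
      = (if 0 ≤ u ∧ u < (board.length : Int) ∧ 0 ≤ v ∧ v < (((PySem.List.pyGet? board 0).getD []).length : Int)
         then [((u, v) : Int × Int)] else []) := by
    intro u v; split <;> simp [pvToPair, PySem.List.pyGetD]
  simp only [eA, map_filter_cons, List.filter_nil, List.map_nil, List.append_nil,
             decide_eq_true_eq]
  norm_num
  rw [show x + -1 = x - 1 from by ring, show y + -1 = y - 1 from by ring]

lemma mem_cands (c : List Int) (a b h w : Int) :
    ((a, b) ∈ pvCands (PySem.List.pyGetD c 0 0) (PySem.List.pyGetD c 1 0) h w)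
      ↔ pvAttacks c a b h w = true := by
  unfold pvCands pvAttacks
  simp only [List.mem_append, List.mem_map, List.mem_filter, PySem.List.mem_pyRange_one,
    decide_eq_true_eq, Bool.or_eq_true, Bool.and_eq_true, beq_iff_eq, bne_iff_ne,
    List.mem_cons, List.not_mem_nil, or_false, Prod.mk.injEq]
  constructor
  · rintro ((⟨j, ⟨⟨h1, h2⟩, h3⟩, h4, h5⟩ | ⟨i, ⟨⟨h1, h2⟩, h3⟩, h4, h5⟩) | ⟨d, ⟨hd, hb⟩, h4, h5⟩)
    · omega
    · omega
    · rcases hd with rfl|rfl|rfl|rfl|rfl|rfl|rfl|rfl <;> simp at hb h4 h5 <;> omega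
  · rintro ((⟨⟨⟨h1, h2⟩, h3⟩, h4⟩ | ⟨⟨⟨h1, h2⟩, h3⟩, h4⟩) | ⟨⟨⟨⟨hm, h1⟩, h2⟩, h3⟩, h4⟩)
    · exact Or.inl (Or.inl ⟨b, ⟨⟨h3, h4⟩, by omega⟩, by omega, rfl⟩)
    · exact Or.inl (Or.inr ⟨a, ⟨⟨h3, h4⟩, by omega⟩, rfl, by omega⟩)
    · have hx : a = PySem.List.pyGetD c 0 0 - 1 ∨ a = PySem.List.pyGetD c 0 0 ∨ a = PySem.List.pyGetD c 0 0 + 1 := by omega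
      have hy : b = PySem.List.pyGetD c 1 0 - 1 ∨ b = PySem.List.pyGetD c 1 0 ∨ b = PySem.List.pyGetD c 1 0 + 1 := by omega
      rcases hx with rfl|rfl|rfl <;> rcases hy with rfl|rfl|rfl <;>
        [exact Or.inr ⟨(-1,-1), ⟨by norm_num, by (try simp); (try omega)⟩, by (try simp); (try omega), by (try simp); (try omega)⟩;
         exact Or.inr ⟨(-1,0), ⟨by norm_num, by (try simp); (try omega)⟩, by (try simp); (try omega), by (try simp); (try omega)⟩;
         exact Or.inr ⟨(-1,1), ⟨by norm_num, by (try simp); (try omega)⟩, by (try simp); (try omega), by (try simp); (try omega)⟩;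
         exact Or.inr ⟨(0,-1), ⟨by norm_num, by (try simp); (try omega)⟩, by (try simp); (try omega), by (try simp); (try omega)⟩;
         (exfalso; omega);
         exact Or.inr ⟨(0,1), ⟨by norm_num, by (try simp); (try omega)⟩, by (try simp); (try omega), by (try simp); (try omega)⟩;
         exact Or.inr ⟨(1,-1), ⟨by norm_num, by (try simp); (try omega)⟩, by (try simp); (try omega), by (try simp); (try omega)⟩;
         exact Or.inr ⟨(1,0), ⟨by norm_num, by (try simp); (try omega)⟩, by (try simp); (try omega), by (try simp); (try omega)⟩;
         exact Or.inr ⟨(1,1), ⟨by norm_num, by (try simp); (try omega)⟩, by (try simp); (try omega), by (try simp); (try omega)⟩]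

lemma filter_add {α : Type} [BEq α] [LawfulBEq α] (f : α → Bool) (s : List α) (x : α) :
    (PySem.Set.add s x).filter f
      = if f x = true then PySem.Set.add (s.filter f) x else s.filter f := by
  rw [PySem.Set.add_eq_ite, PySem.Set.add_eq_ite]
  by_cases hx : x ∈ s <;> by_cases hf : f x = true <;>
    simp_all [List.filter_append, List.mem_filter]

lemma foldl_add_filter {α : Type} [BEq α] [LawfulBEq α] (f : α → Bool) (l : List α) :
    ∀ s : List α, (l.foldl PySem.Set.add s).filter f = (l.filter f).foldl PySem.Set.add (s.filter f) := by
  induction l with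
  | nil => intro s; rfl
  | cons x xs ih =>
    intro s
    rw [List.foldl_cons, ih, List.filter_cons]
    by_cases hf : f x = true <;> simp [hf, filter_add]

lemma ofList_filter {α : Type} [BEq α] [LawfulBEq α] (f : α → Bool) (l : List α) :
    PySem.Set.ofList (l.filter f) = (PySem.Set.ofList l).filter f := by
  rw [PySem.Set.ofList_eq_foldl, PySem.Set.ofList_eq_foldl, foldl_add_filter]
  rfl

lemma contains_cell (c : List Int) (board : List (List Int)) (p : Int × Int) :
    (PySem.Set.ofList
        ((get_xs_for_one_cell (PySem.List.pyGetD c 0 0) (PySem.List.pyGetD c 1 0) board).map pvToPair)).contains p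
      = pvAttacks c p.1 p.2 (board.length : Int) (((PySem.List.pyGet? board 0).getD []).length : Int) := by
  obtain ⟨a, b⟩ := p
  rcases hb : pvAttacks c a b (board.length : Int) (((PySem.List.pyGet? board 0).getD []).length : Int) with _ | _
  · rw [Bool.eq_false_iff]
    intro hcon
    rw [PySem.Set.contains_iff, PySem.Set.mem_ofList, cands_eq, mem_cands] at hcon
    simp [hcon] at hb
  · rw [PySem.Set.contains_iff, PySem.Set.mem_ofList, cands_eq, mem_cands]
    exact hb

lemma foldl_inter (board : List (List Int)) (cells : List (List Int)) :
    ∀ s : List (Int × Int),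
    cells.foldl (fun s c =>
        PySem.Set.inter s (PySem.Set.ofList
          ((get_xs_for_one_cell (PySem.List.pyGetD c 0 0) (PySem.List.pyGetD c 1 0) board).map pvToPair))) s
      = s.filter (fun p => cells.all (fun c =>
          pvAttacks c p.1 p.2 (board.length : Int) (((PySem.List.pyGet? board 0).getD []).length : Int))) := by
  induction cells with
  | nil => intro s; simp
  | cons c cs ih =>
    intro s
    simp only [List.foldl_cons]
    rw [ih]
    rw [show ∀ t : List (Int × Int), PySem.Set.inter s t = s.filter (fun x => t.contains x) from fun _ => rfl]
    rw [List.filter_filter]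
    apply List.filter_congr
    intro p _
    simp only [List.all_cons]
    rw [← contains_cell c board p]
    exact Bool.and_comm _ _

lemma ports_agree (color : Int) (colorMap : List (Int × List (List Int))) (board : List (List Int)) :
    get_xs_for_one_color color colorMap board = get_xs_for_one_color_alt color colorMap board := by
  unfold get_xs_for_one_color get_xs_for_one_color_alt
  cases hget : (⟨colorMap⟩ : PySem.Dict Int (List (List Int))).get? color with
  | none => rfl
  | some coords =>
    cases coords with
    | nil => rfl
    | cons c0 rest =>
      simp only [PySem.List.pyGetD_zero_cons]
      rw [if_neg (by simp), if_neg (by simp)]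
      rw [show ∀ t : List (Int × Int), PySem.Set.union PySem.Set.empty t = PySem.Set.ofList t from fun _ => rfl,
          PySem.Set.ofList_eq_self_of_nodup _ (PySem.Set.nodup_ofList _)]
      rw [PySem.List.foldl_pyRange_pyGetD' (c0 :: rest) []
            (fun s c => PySem.Set.inter s (PySem.Set.ofList
              ((get_xs_for_one_cell (PySem.List.pyGetD c 0 0) (PySem.List.pyGetD c 1 0) board).map pvToPair)))
            _ (by norm_num)]
      rw [show ((1 : Int).toNat) = 1 from rfl, List.drop_one, List.tail_cons]
      rw [foldl_inter]
      rw [ofList_filter, ← cands_eq]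
      apply List.filter_congr
      intro p hp
      rw [PySem.Set.mem_ofList, cands_eq, mem_cands] at hp
      simp only [List.all_cons, hp, Bool.true_and]

-- ===== VERDICT (by name: the statement is the Claim_ definition above) =====
theorem get_xs_for_one_color_spec : Claim_equal_get_xs_for_one_color := by
  intro color colorMap board _ _
  unfold Spec_get_xs_for_one_color
  exact ports_agree color colorMap board
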